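-- pv_equiv track=rewrite | github.com/BenjaminFraser/Advent-of-code-24 | Day_19/day_19_memoisation.py | find_all_combinations
-- ===== SOURCE A (Python) =====
-- from collections import defaultdict
--
-- def find_all_combinations(target, items):
--     memo = {}
--     n = len(target)
--
--     # Precompute prefix map
--     prefix_map = defaultdict(list)
--     for item in items:
--         prefix_map[item[0]].append(item)
--
--     def backtrack(start):
--         if start in memo:
--             return memo[start]
--         if start == n:
--             return [[]]
--
--         solutions = []
--         if target[start] in prefix_map:
--             for item in prefix_map[target[start]]:
--                 if target.startswith(item, start):
--                     sub_solutions = backtrack(start + len(item))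
--                     for sub_solution in sub_solutions:
--                         solutions.append([item] + sub_solution)
--
--         memo[start] = solutions
--         return solutions
--
--     return backtrack(0)
-- ===== SOURCE B (Python) =====
-- def find_all_combinations(target, items):
--     n = len(target)
--     solutions = [None] * n + [[[]]]
--     for start in range(n - 1, -1, -1):
--         sols = []
--         for item in items:
--             if target.startswith(item, start):
--                 for sub in solutions[start + len(item)]:
--                     sols.append([item] + sub)
--         solutions[start] = sols
--     return solutions[0]
-- ===== Notes on version B (the rewrite author's own statement) =====
-- stated objective: simpler
-- what changed: Replaces the memoised top-down recursion with a first-char prefix map and memo dict by a plain bottom-up DP table over positions n..0 scanning items directly.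
import Mathlib
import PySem

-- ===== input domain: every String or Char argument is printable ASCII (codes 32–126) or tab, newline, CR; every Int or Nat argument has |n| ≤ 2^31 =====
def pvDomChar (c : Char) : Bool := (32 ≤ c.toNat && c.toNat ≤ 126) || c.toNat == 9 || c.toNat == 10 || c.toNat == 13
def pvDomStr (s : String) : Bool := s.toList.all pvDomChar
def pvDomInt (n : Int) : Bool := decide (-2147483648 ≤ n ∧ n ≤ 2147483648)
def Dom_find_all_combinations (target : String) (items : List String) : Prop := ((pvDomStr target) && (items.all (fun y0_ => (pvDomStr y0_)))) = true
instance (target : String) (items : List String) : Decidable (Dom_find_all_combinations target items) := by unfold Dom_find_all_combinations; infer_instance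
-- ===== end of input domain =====

-- B replaces A's memoised recursion + first-char prefix map by a bottom-up DP table filled
-- from the end of the target (objective: simpler — no memo dict, no prefix map, no recursion).

-- ===== PORT A =====
-- prefix_map = defaultdict(list); for item in items: prefix_map[item[0]].append(item)
-- (item[0] on an empty item is an IndexError in Python: pyGet? returns none there; Pre_ excludes it)
def pvPrefixMap (items : List String) : PySem.Dict Char (List String) :=
  items.foldl (fun d item =>
    match PySem.Str.pyGet? item 0 with
    | some c => d.modify c [] (· ++ [item])
    | none => d) PySem.Dict.empty

-- backtrack(start) with the memo dict threaded through; fuel = n + 1 - start suffices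
-- (each recursive call strictly increases start since Pre_ rules out empty items);
-- target.startswith(item, start) is ported as item.toList.isPrefixOf (tgt.drop start),
-- exact for the nonnegative starts that occur here.
def pvBacktrack (tgt : List Char) (pm : PySem.Dict Char (List String)) :
    Nat → Nat → PySem.Dict Nat (List (List String)) →
    List (List String) × PySem.Dict Nat (List (List String))
  | 0, _, memo => ([], memo)   -- fuel exhausted: unreachable on inputs satisfying Pre_
  | fuel + 1, start, memo =>
    match memo.get? start with
    | some v => (v, memo)
    | none =>
      if start = tgt.length then ([[]], memo)
      else
        let sm :=
          match tgt[start]? with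
          | none => (([] : List (List String)), memo)   -- unreachable: start < tgt.length here
          | some c =>
            if pm.contains c then
              (pm.getD c []).foldl (fun (acc : List (List String) × PySem.Dict Nat (List (List String))) (item : String) =>
                if item.toList.isPrefixOf (tgt.drop start) then
                  let r := pvBacktrack tgt pm fuel (start + item.toList.length) acc.2
                  (acc.1 ++ r.1.map (fun sub => item :: sub), r.2)
                else acc) (([] : List (List String)), memo)
            else (([] : List (List String)), memo)
        (sm.1, sm.2.insert start sm.1)

def find_all_combinations (target : String) (items : List String) : List (List String) :=
  (pvBacktrack target.toList (pvPrefixMap items) (target.toList.length + 1) 0 PySem.Dict.empty).1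

-- ===== PORT B =====
-- solutions table for the suffixes of the target, filled back-to-front:
-- pvTable items s = [solutions for s.drop 0, solutions for s.drop 1, …, [[]]]
def pvTable (items : List String) : List Char → List (List (List String))
  | [] => [[[]]]
  | c :: rest =>
    let tab := pvTable items rest
    let sols := items.foldl (fun acc item =>
      if item.toList.isPrefixOf (c :: rest) then
        acc ++ (tab.getD (item.toList.length - 1) []).map (fun sub => item :: sub)
      else acc) []
    sols :: tab

def find_all_combinations_alt (target : String) (items : List String) : List (List String) :=
  (pvTable items target.toList).getD 0 []

-- ===== PRECONDITION & SPEC =====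
-- Pre_ excludes exactly the inputs where the Python A raises: an empty string among the
-- items makes item[0] raise IndexError while building the prefix map.
def Pre_find_all_combinations (target : String) (items : List String) : Prop :=
  "" ∉ items
instance (target : String) (items : List String) : Decidable (Pre_find_all_combinations target items) := by unfold Pre_find_all_combinations; infer_instance

def pvWitness_find_all_combinations : String × List String := ("aab", ["a", "ab", "b"])

def Spec_find_all_combinations (target : String) (items : List String) (out : List (List String)) : Prop := out = find_all_combinations_alt target items
instance (target : String) (items : List String) (out : List (List String)) : Decidable (Spec_find_all_combinations target items out) := by unfold Spec_find_all_combinations; infer_instance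

-- ===== CLAIM (what is proved, stated in full; the proofs are below) =====
def Claim_equal_find_all_combinations : Prop := ∀ (target : String) (items : List String), Dom_find_all_combinations target items → Pre_find_all_combinations target items → Spec_find_all_combinations target items (find_all_combinations target items)

-- ===== LEMMAS AND PROOFS =====

theorem pvTable_getD_drop (items : List String) (s : List Char) (k : Nat) (hk : k ≤ s.length) :
    (pvTable items s).getD k [] = (pvTable items (s.drop k)).getD 0 [] := by
  induction k generalizing s with
  | zero => simp
  | succ k ih =>
    cases s with
    | nil => simp at hk
    | cons c rest =>
      simp only [pvTable, List.getD_cons_succ, List.drop_succ_cons]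
      exact ih rest (by simpa using hk)

-- memo invariant: every memoised entry already equals the corresponding DP-table entry
def pvInv (items : List String) (tgt : List Char) (memo : PySem.Dict Nat (List (List String))) : Prop :=
  ∀ k v, memo.get? k = some v → v = (pvTable items (tgt.drop k)).getD 0 []

-- the common "pure" step both folds reduce to
def pvPure (items : List String) (tgt : List Char) (start : Nat)
    (acc : List (List String)) (item : String) : List (List String) :=
  if item.toList.isPrefixOf (tgt.drop start) then
    acc ++ ((pvTable items (tgt.drop (start + item.toList.length))).getD 0 []).map (fun sub => item :: sub)
  else acc

theorem pvPrefixMap_aux (l : List String) (d : PySem.Dict Char (List String)) (c : Char)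
    (hne : ∀ it ∈ l, it ≠ "") :
    (l.foldl (fun d item =>
      match PySem.Str.pyGet? item 0 with
      | some ch => d.modify ch [] (· ++ [item])
      | none => d) d).getD c []
    = d.getD c [] ++ l.filter (fun it => it.toList.head? == some c) := by
  induction l generalizing d with
  | nil => simp
  | cons it t ih =>
    have hit : it ≠ "" := hne it (by simp)
    cases htl : it.toList with
    | nil => exact absurd (by simpa using htl) hit
    | cons ch tl =>
      have hget : PySem.Str.pyGet? it 0 = some ch := by simp [PySem.Str.pyGet?, htl]
      simp only [List.foldl_cons, hget, List.filter_cons, htl, List.head?_cons]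
      rw [ih _ (fun x hx => hne x (by simp [hx]))]
      rw [PySem.Dict.getD_modify]
      by_cases hc : c = ch
      · subst hc
        simp [List.append_assoc]
      · have : (some ch == some c) = false := by
          simp [beq_iff_eq]; exact fun h => hc h.symm
        simp [hc, this]

theorem pvPrefixMap_getD (items : List String) (c : Char) (hne : "" ∉ items) :
    (pvPrefixMap items).getD c [] = items.filter (fun it => it.toList.head? == some c) := by
  have := pvPrefixMap_aux items PySem.Dict.empty c (fun it h => by rintro rfl; exact hne h)
  simpa [pvPrefixMap] using this

theorem pvFilter_fold (items : List String) (tgt : List Char) (start : Nat) (c : Char)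
    (rest : List Char) (hdrop : tgt.drop start = c :: rest) :
    ∀ (l : List String) (acc : List (List String)), (∀ it ∈ l, it ≠ "") →
    (l.filter (fun it => it.toList.head? == some c)).foldl (pvPure items tgt start) acc
      = l.foldl (pvPure items tgt start) acc := by
  intro l
  induction l with
  | nil => intro acc _; rfl
  | cons it t ih =>
    intro acc hne
    have hit : it ≠ "" := hne it (by simp)
    cases htl : it.toList with
    | nil => exact absurd (by simpa using htl) hit
    | cons ch tl =>
      by_cases hc : ch = c
      · subst hc
        simp only [List.filter_cons, htl, List.head?_cons, beq_self_eq_true, if_pos rfl,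
          List.foldl_cons]
        exact ih _ (fun x hx => hne x (by simp [hx]))
      · have hb : (it.toList.head? == some c) = false := by
          simp [htl, beq_iff_eq, hc]
        have hpre : it.toList.isPrefixOf (tgt.drop start) = false := by
          rw [htl, hdrop]; simp [List.isPrefixOf, hc]
        simp only [List.filter_cons, hb, if_neg (by simp [hb] : ¬ (it.toList.head? == some c) = true),
          List.foldl_cons]
        rw [show pvPure items tgt start acc it = acc by simp [pvPure, hpre]]
        exact ih _ (fun x hx => hne x (by simp [hx]))

theorem pvTable_head (items : List String) (tgt : List Char) (start : Nat) (c : Char)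
    (rest : List Char) (hne : "" ∉ items)
    (hdrop : tgt.drop start = c :: rest) (hrest : rest = tgt.drop (start + 1)) :
    (pvTable items (tgt.drop start)).getD 0 [] = items.foldl (pvPure items tgt start) [] := by
  conv_lhs => rw [hdrop]
  simp only [pvTable, List.getD_cons_zero]
  apply PySem.List.foldl_congr_mem
  intro acc item hmem
  have hit : item ≠ "" := by rintro rfl; exact hne hmem
  have hlen : 1 ≤ item.toList.length := by
    cases h : item.toList with
    | nil => exact absurd (by simpa using h) hit
    | cons _ _ => simp
  by_cases hp : item.toList.isPrefixOf (c :: rest) = true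
  · have hle : item.toList.length ≤ rest.length + 1 := by
      have := List.IsPrefix.length_le (List.isPrefixOf_iff_prefix.mp hp)
      simpa using this
    rw [if_pos hp]
    rw [pvTable_getD_drop items rest (item.toList.length - 1) (by omega)]
    unfold pvPure
    rw [if_pos (by rw [hdrop]; exact hp)]
    congr 2
    rw [hrest, List.drop_drop]
    have heq : start + 1 + (item.toList.length - 1) = start + item.toList.length := by omega
    rw [heq]
  · rw [if_neg hp]
    unfold pvPure
    rw [if_neg (by rw [hdrop]; exact hp)]

theorem pvFoldA (items : List String) (tgt : List Char) (fuel start : Nat)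
    (hne : "" ∉ items) (hfs : tgt.length + 1 ≤ fuel + 1 + start)
    (IH : ∀ s m, s ≤ tgt.length → tgt.length + 1 ≤ fuel + s → pvInv items tgt m →
      (pvBacktrack tgt (pvPrefixMap items) fuel s m).1 = (pvTable items (tgt.drop s)).getD 0 []
      ∧ pvInv items tgt (pvBacktrack tgt (pvPrefixMap items) fuel s m).2) :
    ∀ (cands : List String) (acc0 : List (List String))
      (memo0 : PySem.Dict Nat (List (List String))),
      (∀ it ∈ cands, it ∈ items) → pvInv items tgt memo0 →
      (cands.foldl (fun (acc : List (List String) × PySem.Dict Nat (List (List String))) (item : String) =>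
          if item.toList.isPrefixOf (tgt.drop start) then
            let r := pvBacktrack tgt (pvPrefixMap items) fuel (start + item.toList.length) acc.2
            (acc.1 ++ r.1.map (fun sub => item :: sub), r.2)
          else acc) (acc0, memo0)).1 = cands.foldl (pvPure items tgt start) acc0
      ∧ pvInv items tgt ((cands.foldl (fun (acc : List (List String) × PySem.Dict Nat (List (List String))) (item : String) =>
          if item.toList.isPrefixOf (tgt.drop start) then
            let r := pvBacktrack tgt (pvPrefixMap items) fuel (start + item.toList.length) acc.2
            (acc.1 ++ r.1.map (fun sub => item :: sub), r.2)
          else acc) (acc0, memo0)).2) := by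
  intro cands
  induction cands with
  | nil => intro acc0 memo0 _ hinv; exact ⟨rfl, hinv⟩
  | cons item t ih =>
    intro acc0 memo0 hmem hinv
    have hit : item ≠ "" := by rintro rfl; exact hne (hmem "" (by simp))
    have hlen : 1 ≤ item.toList.length := by
      cases h : item.toList with
      | nil => exact absurd (by simpa using h) hit
      | cons _ _ => simp
    by_cases hp : item.toList.isPrefixOf (tgt.drop start) = true
    · have hsub : item.toList.length ≤ tgt.length - start := by
        have := List.IsPrefix.length_le (List.isPrefixOf_iff_prefix.mp hp)
        simpa using this
      have hs : start + item.toList.length ≤ tgt.length := by omega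
      have hsf : tgt.length + 1 ≤ fuel + (start + item.toList.length) := by omega
      obtain ⟨h1, h2⟩ := IH (start + item.toList.length) memo0 hs hsf hinv
      simp only [List.foldl_cons, if_pos hp]
      rw [show pvPure items tgt start acc0 item
            = acc0 ++ ((pvTable items (tgt.drop (start + item.toList.length))).getD 0 []).map
                (fun sub => item :: sub) by simp [pvPure, hp]]
      rw [← h1]
      exact ih _ _ (fun x hx => hmem x (by simp [hx])) h2
    · simp only [List.foldl_cons, if_neg hp]
      rw [show pvPure items tgt start acc0 item = acc0 by simp [pvPure, hp]]
      exact ih _ _ (fun x hx => hmem x (by simp [hx])) hinv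

theorem pvMain (items : List String) (tgt : List Char) (hne : "" ∉ items) :
    ∀ (fuel start : Nat) (memo : PySem.Dict Nat (List (List String))),
      start ≤ tgt.length → tgt.length + 1 ≤ fuel + start → pvInv items tgt memo →
      (pvBacktrack tgt (pvPrefixMap items) fuel start memo).1
        = (pvTable items (tgt.drop start)).getD 0 []
      ∧ pvInv items tgt (pvBacktrack tgt (pvPrefixMap items) fuel start memo).2 := by
  intro fuel
  induction fuel with
  | zero => intro start memo h1 h2 _; omega
  | succ fuel ih =>
    intro start memo hle hfuel hinv
    have hne' : ∀ it ∈ items, it ≠ "" := fun it h => by rintro rfl; exact hne h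
    cases hm : memo.get? start with
    | some v =>
      have heq : pvBacktrack tgt (pvPrefixMap items) (fuel + 1) start memo = (v, memo) := by
        simp [pvBacktrack, hm]
      rw [heq]
      exact ⟨hinv _ _ hm, hinv⟩
    | none =>
      by_cases hend : start = tgt.length
      · subst hend
        have heq : pvBacktrack tgt (pvPrefixMap items) (fuel + 1) tgt.length memo
            = ([[]], memo) := by
          simp [pvBacktrack, hm]
        rw [heq]
        refine ⟨?_, hinv⟩
        simp [List.drop_length, pvTable]
      · have hlt : start < tgt.length := by omega
        have hget : tgt[start]? = some tgt[start] := List.getElem?_eq_getElem hlt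
        have hdrop : tgt.drop start = tgt[start] :: tgt.drop (start + 1) :=
          (List.getElem_cons_drop hlt).symm
        -- the canonical value at this position
        have htab : (pvTable items (tgt.drop start)).getD 0 []
            = items.foldl (pvPure items tgt start) [] :=
          pvTable_head items tgt start tgt[start] (tgt.drop (start + 1)) hne hdrop rfl
        by_cases hc : (pvPrefixMap items).contains tgt[start] = true
        · obtain ⟨h1, h2⟩ := pvFoldA items tgt fuel start hne (by omega) ih
            ((pvPrefixMap items).getD tgt[start] []) [] memo
            (by
              intro it hiti
              rw [pvPrefixMap_getD items tgt[start] hne] at hiti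
              exact (List.mem_filter.mp hiti).1)
            hinv
          have hval : ((pvPrefixMap items).getD tgt[start] []).foldl (pvPure items tgt start) []
              = items.foldl (pvPure items tgt start) [] := by
            rw [pvPrefixMap_getD items tgt[start] hne]
            exact pvFilter_fold items tgt start tgt[start] (tgt.drop (start + 1)) hdrop items [] hne'
          have heq : pvBacktrack tgt (pvPrefixMap items) (fuel + 1) start memo
              = ((((pvPrefixMap items).getD tgt[start] []).foldl
                  (fun (acc : List (List String) × PySem.Dict Nat (List (List String))) (item : String) =>
                    if item.toList.isPrefixOf (tgt.drop start) then
                      let r := pvBacktrack tgt (pvPrefixMap items) fuel (start + item.toList.length) acc.2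
                      (acc.1 ++ r.1.map (fun sub => item :: sub), r.2)
                    else acc) ([], memo)).1,
                 (((pvPrefixMap items).getD tgt[start] []).foldl
                  (fun (acc : List (List String) × PySem.Dict Nat (List (List String))) (item : String) =>
                    if item.toList.isPrefixOf (tgt.drop start) then
                      let r := pvBacktrack tgt (pvPrefixMap items) fuel (start + item.toList.length) acc.2
                      (acc.1 ++ r.1.map (fun sub => item :: sub), r.2)
                    else acc) ([], memo)).2.insert start
                  (((pvPrefixMap items).getD tgt[start] []).foldl
                  (fun (acc : List (List String) × PySem.Dict Nat (List (List String))) (item : String) =>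
                    if item.toList.isPrefixOf (tgt.drop start) then
                      let r := pvBacktrack tgt (pvPrefixMap items) fuel (start + item.toList.length) acc.2
                      (acc.1 ++ r.1.map (fun sub => item :: sub), r.2)
                    else acc) ([], memo)).1) := by
            simp only [pvBacktrack, hm, hget]
            rw [if_neg hend, if_pos hc]
          rw [heq]
          refine ⟨by rw [htab, ← hval]; exact h1, ?_⟩
          intro k v hk
          rw [PySem.Dict.get?_insert] at hk
          by_cases hks : k = start
          · rw [if_pos hks] at hk
            cases hk
            subst hks
            rw [h1, hval, ← htab]
          · rw [if_neg hks] at hk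
            exact h2 _ _ hk
        · have hcf : (pvPrefixMap items).contains tgt[start] = false := by
            simpa using hc
          have hnilc : (pvPrefixMap items).getD tgt[start] [] = [] :=
            PySem.Dict.getD_of_not_contains _ _ hcf
          have hval : items.foldl (pvPure items tgt start) [] = [] := by
            rw [← pvFilter_fold items tgt start tgt[start] (tgt.drop (start + 1)) hdrop items [] hne',
              ← pvPrefixMap_getD items tgt[start] hne, hnilc]
            rfl
          have heq : pvBacktrack tgt (pvPrefixMap items) (fuel + 1) start memo
              = ([], memo.insert start []) := by
            simp only [pvBacktrack, hm, hget]
            rw [if_neg hend, if_neg hc]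
          rw [heq]
          refine ⟨by rw [htab, hval], ?_⟩
          intro k v hk
          rw [PySem.Dict.get?_insert] at hk
          by_cases hks : k = start
          · rw [if_pos hks] at hk
            cases hk
            subst hks
            rw [htab, hval]
          · rw [if_neg hks] at hk
            exact hinv _ _ hk

theorem find_all_combinations_spec : Claim_equal_find_all_combinations := by
  intro target items _ hpre
  unfold Spec_find_all_combinations find_all_combinations find_all_combinations_alt
  have h := (pvMain items target.toList hpre (target.toList.length + 1) 0 PySem.Dict.empty
    (by omega) (by omega)
    (by intro k v hk; simp [PySem.Dict.get?_empty] at hk)).1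
  simpa using h
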